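-- pv_equiv track=rewrite | github.com/hammadshakeelai/safetynet2 | safetynet3/vscode/G_1_.py | indexC
-- ===== SOURCE A (Python) =====
-- def N(first_list,second_list):
--     firstN=len(first_list)
--     secondN=len(second_list)
--     if firstN==secondN:
--         return "="
--     elif firstN>secondN:
--         return ">"
--     else:
--         return "<"
--
-- def indexC(first_list,second_list):
--     greater=N(first_list,second_list)
--     firstN=len(first_list)
--     secondN=len(second_list)
--     if greater=="=":
--         for i in range(firstN):
--             if first_list!=second_list:
--               return False
--     elif greater==">":
--         for i in range(firstN):
--             if first_list!=second_list:
--                 return False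
--     elif greater=="<":
--         for i in range(secondN):
--             if first_list!=second_list:
--                 return False
--     return True
-- ===== SOURCE B (Python) =====
-- def indexC(first_list, second_list):
--     if len(first_list) != len(second_list):
--         return False
--     return first_list == second_list
-- ===== Notes on version B (the rewrite author's own statement) =====
-- stated objective: faster
-- what changed: Replaced the length-comparison helper plus a loop that re-compares the whole lists once per index with a direct length check followed by a single list equality comparison.
import Mathlib
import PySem

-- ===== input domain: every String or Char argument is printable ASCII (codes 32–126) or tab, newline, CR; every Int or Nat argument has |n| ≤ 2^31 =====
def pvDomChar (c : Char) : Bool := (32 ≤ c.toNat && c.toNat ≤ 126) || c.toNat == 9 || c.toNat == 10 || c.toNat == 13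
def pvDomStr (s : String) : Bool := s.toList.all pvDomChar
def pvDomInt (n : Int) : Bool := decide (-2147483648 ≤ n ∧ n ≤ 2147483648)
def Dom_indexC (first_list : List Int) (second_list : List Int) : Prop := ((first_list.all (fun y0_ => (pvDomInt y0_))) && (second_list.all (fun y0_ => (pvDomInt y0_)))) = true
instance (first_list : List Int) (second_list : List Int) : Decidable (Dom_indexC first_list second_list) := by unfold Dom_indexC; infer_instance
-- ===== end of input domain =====

-- B replaces A's helper plus per-index whole-list re-comparison loops (quadratic) with one length check and one list equality (linear).

-- ===== PORT A =====
-- helper N: compares the two lengths and returns "=", ">" or "<"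
def indexC_N (first_list : List Int) (second_list : List Int) : String :=
  let firstN := first_list.length
  let secondN := second_list.length
  if firstN = secondN then "="
  else if firstN > secondN then ">"
  else "<"

-- the body of each of A's for-loops: k iterations, each checking `first_list != second_list`
-- and returning False on the first failing check (the check does not depend on i)
def indexC_loop (k : Nat) (first_list : List Int) (second_list : List Int) : Bool :=
  match k with
  | 0 => true
  | k + 1 => if first_list ≠ second_list then false else indexC_loop k first_list second_list

def indexC (first_list : List Int) (second_list : List Int) : Bool :=
  let greater := indexC_N first_list second_list
  let firstN := first_list.length
  let secondN := second_list.length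
  if greater = "=" then indexC_loop firstN first_list second_list
  else if greater = ">" then indexC_loop firstN first_list second_list
  else if greater = "<" then indexC_loop secondN first_list second_list
  else true

-- ===== PORT B =====
def indexC_alt (first_list : List Int) (second_list : List Int) : Bool :=
  if first_list.length ≠ second_list.length then false
  else first_list == second_list

-- ===== PRECONDITION & SPEC =====
def Spec_indexC (first_list : List Int) (second_list : List Int) (out : Bool) : Prop := out = indexC_alt first_list second_list
instance (first_list : List Int) (second_list : List Int) (out : Bool) : Decidable (Spec_indexC first_list second_list out) := by unfold Spec_indexC; infer_instance

-- ===== CLAIM (what is proved, stated in full; the proofs are below) =====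
def Claim_equal_indexC : Prop := ∀ (first_list : List Int) (second_list : List Int), Dom_indexC first_list second_list → Spec_indexC first_list second_list (indexC first_list second_list)

-- ===== LEMMAS AND PROOFS =====
theorem indexC_loop_eq (k : Nat) (a b : List Int) (h : a = b) : indexC_loop k a b = true := by
  induction k with
  | zero => rfl
  | succ k ih => subst h; simp [indexC_loop, ih]

theorem indexC_loop_ne (k : Nat) (a b : List Int) (h : a ≠ b) : indexC_loop (k + 1) a b = false := by
  simp [indexC_loop, h]

-- ===== VERDICT (by name: the statement is the Claim_ definition above) =====
theorem indexC_spec : Claim_equal_indexC := by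
  intro a b _
  unfold Spec_indexC indexC indexC_N indexC_alt
  by_cases hlen : a.length = b.length
  · by_cases hab : a = b
    · simp [hab, indexC_loop_eq]
    · have h1 : a.length ≠ 0 := by
        intro h0
        have h2 : b.length = 0 := hlen ▸ h0
        exact hab ((List.length_eq_zero_iff.mp h0).trans (List.length_eq_zero_iff.mp h2).symm)
      obtain ⟨k, hk⟩ : ∃ k, b.length = k + 1 := ⟨b.length - 1, by omega⟩
      simp [hlen, hab, hk, indexC_loop_ne _ _ _ hab]
  · have hab : a ≠ b := fun h => hlen (h ▸ rfl)
    rcases Nat.lt_or_ge b.length a.length with hgt | hge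
    · obtain ⟨k, hk⟩ : ∃ k, a.length = k + 1 := ⟨a.length - 1, by omega⟩
      have h1 : ¬ (k + 1 = b.length) := by omega
      have h2 : b.length ≤ k := by omega
      simp [hk, h1, h2, indexC_loop_ne _ _ _ hab]
    · obtain ⟨k, hk⟩ : ∃ k, b.length = k + 1 := ⟨b.length - 1, by omega⟩
      have h1 : ¬ (a.length = k + 1) := by omega
      have h2 : ¬ (k + 1 < a.length) := by omega
      simp [hk, h1, h2, indexC_loop_ne _ _ _ hab]
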